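-- pv_equiv track=rewrite | github.com/IEEE-NITK/SummerProjects19 | Cryptopals/Assignment 1/Karn Tiwari/Set 2_Challenge2.py | hexadecimal_decimal
-- ===== SOURCE A (Python) =====
-- def hexadecimal_decimal(n):
--     n=str(n)
--
--     #List containing Hex number
--     z=['0','1','2','3','4','5','6','7','8','9','a','b','c','d','e','f']
--
--     #Dictionary containing Number and its corresponding Hex value
--     y={}
--     for i in range(16):
--         y[i]=z[i]
--
--     #Converting Hexadecimal number to Decimal number
--     a=len(n)
--     n=n[::-1]
--     m=0
--     for i in range(a):
--         for j in range(16):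
--             if(n[i]==y[j]):
--                 m=m+(16**i)*j
--
--     #Returning Decimal Number
--     return m
-- ===== SOURCE B (Python) =====
-- def hexadecimal_decimal(n):
--     n = str(n)
--     table = {c: v for v, c in enumerate('0123456789abcdef')}
--     m = 0
--     for c in n:
--         m = m * 16 + table.get(c, 0)
--     return m
-- ===== Notes on version B (the rewrite author's own statement) =====
-- stated objective: faster
-- what changed: Replaces the reverse-the-string, 16-way inner scan and 16**i exponentiation with a single left-to-right Horner pass (m = m*16 + digit) over a precomputed char-to-value dict; unknown characters still contribute digit 0.
import Mathlib
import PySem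

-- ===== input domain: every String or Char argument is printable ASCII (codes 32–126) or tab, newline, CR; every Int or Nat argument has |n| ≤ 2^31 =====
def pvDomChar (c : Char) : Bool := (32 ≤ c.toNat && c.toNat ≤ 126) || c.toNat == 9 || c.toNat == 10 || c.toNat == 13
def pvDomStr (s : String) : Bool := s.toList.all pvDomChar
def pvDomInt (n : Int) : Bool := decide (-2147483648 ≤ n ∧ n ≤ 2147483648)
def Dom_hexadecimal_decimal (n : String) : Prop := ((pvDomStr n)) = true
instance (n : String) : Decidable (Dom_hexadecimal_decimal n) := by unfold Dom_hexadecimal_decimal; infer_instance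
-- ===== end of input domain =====

-- B replaces A's string reversal, per-position 16-way scan and 16**i exponentiation by a single
-- left-to-right Horner pass over a precomputed char→value dict (unknown chars count as digit 0).

-- ===== PORT A =====
-- z = list of the 16 hex characters
def hexA_z : List Char := ['0','1','2','3','4','5','6','7','8','9','a','b','c','d','e','f']
-- y = {i: z[i] for i in range(16)}; the index i is always 0..15, so the pyGetD default is never used
def hexA_y : PySem.Dict Int Char :=
  (PySem.List.pyRange 0 16 1).foldl (fun d i => d.insert i (PySem.List.pyGetD hexA_z i ' ')) PySem.Dict.empty

def hexadecimal_decimal (n : String) : Int :=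
  -- n = str(n) is the identity on a string argument
  let a : Int := (n.toList.length : Int)
  -- n = n[::-1]; the step is -1 ≠ 0, so slice? always returns some
  let r : List Char := (PySem.List.slice? n.toList none none (-1)).getD []
  -- i ranges over 0..a-1 (always in range of r) and j over 0..15 (always a key of y),
  -- so the pyGetD/getD defaults are never used and no IndexError/KeyError can occur
  (PySem.List.pyRange 0 a 1).foldl (fun m i =>
    (PySem.List.pyRange 0 16 1).foldl (fun m j =>
      if PySem.List.pyGetD r i ' ' = hexA_y.getD j ' ' then m + 16 ^ i.toNat * j else m) m) 0

-- ===== PORT B =====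
-- table = {c: v for v, c in enumerate('0123456789abcdef')}
def hexB_table : PySem.Dict Char Int :=
  (PySem.List.enumerate "0123456789abcdef".toList 0).foldl (fun d p => d.insert p.2 p.1) PySem.Dict.empty

def hexadecimal_decimal_alt (n : String) : Int :=
  n.toList.foldl (fun m c => m * 16 + hexB_table.getD c 0) 0

-- ===== PRECONDITION & SPEC =====
def Spec_hexadecimal_decimal (n : String) (out : Int) : Prop := out = hexadecimal_decimal_alt n
instance (n : String) (out : Int) : Decidable (Spec_hexadecimal_decimal n out) := by unfold Spec_hexadecimal_decimal; infer_instance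

-- ===== CLAIM (what is proved, stated in full; the proofs are below) =====
def Claim_equal_hexadecimal_decimal : Prop := ∀ (n : String), Dom_hexadecimal_decimal n → Spec_hexadecimal_decimal n (hexadecimal_decimal n)

-- ===== LEMMAS AND PROOFS =====

-- the value B assigns to one character (0..15 for a lowercase hex digit, 0 otherwise)
def hexDigit (c : Char) : Int := hexB_table.getD c 0

-- value of a little-endian (least significant first) list of digit characters
def littleVal : List Char → Int
  | [] => 0
  | c :: t => hexDigit c + 16 * littleVal t

-- A's inner 16-way scan adds P * (digit value of c) to the accumulator
lemma hex_inner_eq (c : Char) (P m : Int) :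
    (PySem.List.pyRange 0 16 1).foldl
      (fun m j => if c = hexA_y.getD j ' ' then m + P * j else m) m
    = m + P * hexDigit c := by
  rw [show PySem.List.pyRange 0 16 1 = [0,1,2,3,4,5,6,7,8,9,10,11,12,13,14,15] from by decide]
  have hb : (([0,1,2,3,4,5,6,7,8,9,10,11,12,13,14,15] : List Int).foldl
      (fun m j => if c = hexA_y.getD j ' ' then m + P * j else m) m)
    = (([0,1,2,3,4,5,6,7,8,9,10,11,12,13,14,15] : List Int).foldl
      (fun m j => m + (if c = hexA_y.getD j ' ' then P * j else 0)) m) := by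
    congr 1
    funext m j
    split <;> simp
  rw [hb, PySem.List.foldl_add]
  simp only [List.map_cons, List.map_nil, List.sum_cons, List.sum_nil,
    show hexA_y.getD 0 ' ' = '0' from by decide, show hexA_y.getD 1 ' ' = '1' from by decide, show hexA_y.getD 2 ' ' = '2' from by decide, show hexA_y.getD 3 ' ' = '3' from by decide, show hexA_y.getD 4 ' ' = '4' from by decide, show hexA_y.getD 5 ' ' = '5' from by decide, show hexA_y.getD 6 ' ' = '6' from by decide, show hexA_y.getD 7 ' ' = '7' from by decide, show hexA_y.getD 8 ' ' = '8' from by decide, show hexA_y.getD 9 ' ' = '9' from by decide, show hexA_y.getD 10 ' ' = 'a' from by decide, show hexA_y.getD 11 ' ' = 'b' from by decide, show hexA_y.getD 12 ' ' = 'c' from by decide, show hexA_y.getD 13 ' ' = 'd' from by decide, show hexA_y.getD 14 ' ' = 'e' from by decide, show hexA_y.getD 15 ' ' = 'f' from by decide]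
  unfold hexDigit
  by_cases h0 : c = '0'
  · subst h0
    simp [show hexB_table.getD '0' 0 = 0 from by decide]
  by_cases h1 : c = '1'
  · subst h1
    simp [show hexB_table.getD '1' 0 = 1 from by decide]
  by_cases h2 : c = '2'
  · subst h2
    simp [show hexB_table.getD '2' 0 = 2 from by decide]
  by_cases h3 : c = '3'
  · subst h3
    simp [show hexB_table.getD '3' 0 = 3 from by decide]
  by_cases h4 : c = '4'
  · subst h4
    simp [show hexB_table.getD '4' 0 = 4 from by decide]
  by_cases h5 : c = '5'
  · subst h5
    simp [show hexB_table.getD '5' 0 = 5 from by decide]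
  by_cases h6 : c = '6'
  · subst h6
    simp [show hexB_table.getD '6' 0 = 6 from by decide]
  by_cases h7 : c = '7'
  · subst h7
    simp [show hexB_table.getD '7' 0 = 7 from by decide]
  by_cases h8 : c = '8'
  · subst h8
    simp [show hexB_table.getD '8' 0 = 8 from by decide]
  by_cases h9 : c = '9'
  · subst h9
    simp [show hexB_table.getD '9' 0 = 9 from by decide]
  by_cases h10 : c = 'a'
  · subst h10
    simp [show hexB_table.getD 'a' 0 = 10 from by decide]
  by_cases h11 : c = 'b'
  · subst h11
    simp [show hexB_table.getD 'b' 0 = 11 from by decide]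
  by_cases h12 : c = 'c'
  · subst h12
    simp [show hexB_table.getD 'c' 0 = 12 from by decide]
  by_cases h13 : c = 'd'
  · subst h13
    simp [show hexB_table.getD 'd' 0 = 13 from by decide]
  by_cases h14 : c = 'e'
  · subst h14
    simp [show hexB_table.getD 'e' 0 = 14 from by decide]
  by_cases h15 : c = 'f'
  · subst h15
    simp [show hexB_table.getD 'f' 0 = 15 from by decide]
  simp [show hexB_table = PySem.Dict.mk [('0',0),('1',1),('2',2),('3',3),('4',4),('5',5),('6',6),('7',7),('8',8),('9',9),('a',10),('b',11),('c',12),('d',13),('e',14),('f',15)] from by decide,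
    PySem.Dict.getD, PySem.Dict.get?, h0, h1, h2, h3, h4, h5, h6, h7, h8, h9, h10, h11, h12, h13, h14, h15, Ne.symm h0, Ne.symm h1, Ne.symm h2, Ne.symm h3, Ne.symm h4, Ne.symm h5, Ne.symm h6, Ne.symm h7, Ne.symm h8, Ne.symm h9, Ne.symm h10, Ne.symm h11, Ne.symm h12, Ne.symm h13, Ne.symm h14, Ne.symm h15]

-- positional sum of 16^k times the digit values is littleVal
lemma hex_sum_eq_littleVal (r : List Char) :
    ((List.range r.length).map (fun k => (16:Int) ^ k * hexDigit (r.getD k ' '))).sum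
      = littleVal r := by
  induction r with
  | nil => simp [littleVal]
  | cons c t ih =>
    rw [List.length_cons, List.range_succ_eq_map]
    simp only [List.map_cons, List.map_map, List.sum_cons, pow_zero, one_mul, List.getD_cons_zero]
    have : ((List.range t.length).map ((fun k => (16:Int) ^ k * hexDigit ((c :: t).getD k ' ')) ∘ (fun i => i + 1))).sum
        = 16 * ((List.range t.length).map (fun k => (16:Int) ^ k * hexDigit (t.getD k ' '))).sum := by
      rw [← List.sum_map_mul_left]
      refine congrArg List.sum (List.map_congr_left fun k _ => ?_)
      simp [Function.comp, pow_succ]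
      ring
    rw [this, ih, littleVal]

-- appending a digit at the end of a little-endian list adds it at the top position
lemma littleVal_append (xs : List Char) (c : Char) :
    littleVal (xs ++ [c]) = littleVal xs + 16 ^ xs.length * hexDigit c := by
  induction xs with
  | nil => simp [littleVal]
  | cons x t ih =>
    simp only [List.cons_append, littleVal, ih, List.length_cons, pow_succ]
    ring

-- B's Horner loop computes the value of the reversed (little-endian) digit list
lemma hex_horner (l : List Char) (m : Int) :
    l.foldl (fun m c => m * 16 + hexDigit c) m
      = m * 16 ^ l.length + littleVal l.reverse := by
  induction l generalizing m with
  | nil => simp [littleVal]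
  | cons c t ih =>
    rw [List.foldl_cons, ih, List.reverse_cons, littleVal_append]
    simp only [List.length_cons, List.length_reverse, pow_succ]
    ring

-- ===== VERDICT (by name: the statement is the Claim_ definition above) =====
theorem hexadecimal_decimal_spec : Claim_equal_hexadecimal_decimal := by
  intro n _
  unfold Spec_hexadecimal_decimal hexadecimal_decimal hexadecimal_decimal_alt
  rw [PySem.List.slice?_none_none_neg_one]
  simp only [Option.getD_some]
  have hin : (PySem.List.pyRange 0 ((n.toList.length : Int)) 1).foldl
      (fun m i => (PySem.List.pyRange 0 16 1).foldl
        (fun m j => if PySem.List.pyGetD n.toList.reverse i ' ' = hexA_y.getD j ' '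
          then m + 16 ^ i.toNat * j else m) m) 0
    = (PySem.List.pyRange 0 ((n.toList.length : Int)) 1).foldl
      (fun m i => m + 16 ^ i.toNat * hexDigit (PySem.List.pyGetD n.toList.reverse i ' ')) 0 := by
    congr 1
    funext m i
    exact hex_inner_eq _ _ _
  refine hin.trans ?_
  have hB := hex_horner n.toList 0
  simp only [hexDigit] at hB
  rw [PySem.List.foldl_add, hB, ← hex_sum_eq_littleVal]
  simp only [zero_add, zero_mul, List.length_reverse, PySem.List.pyRange_one]
  simp [Function.comp_def, List.getD]
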